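-- pv_equiv track=rewrite | github.com/aryanjand/Cryptography-Payground | COMP-7402-Cryptology/Assignments-1/Task 3/task3.py | digraphs
-- ===== SOURCE A (Python) =====
-- def digraphs(plaintext: str):
--     # 4.  Remove spaces and punctuation
--     condensed_text = plaintext.upper()
--     condensed_text = ''.join([char for char in condensed_text if char.isalpha()])
--
--     text_with_filler = ''
--     for i in range(len(condensed_text)):
--         text_with_filler += condensed_text[i]
--
--         if i < len(condensed_text) - 1 and condensed_text[i] == condensed_text[i + 1] and len(text_with_filler) % 2 != 0:
--             text_with_filler += 'X'
--
--     if len(text_with_filler) % 2 != 0: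
--         text_with_filler += 'X'
--
--     res = [text_with_filler[i : i+2] for i in range(0, len(text_with_filler), 2)]
--
--     return res
-- ===== SOURCE B (Python) =====
-- def digraphs(plaintext: str):
--     cond = [c for c in plaintext.upper() if c.isalpha()]
--     res = []
--     i = 0
--     n = len(cond)
--     while i < n:
--         if i + 1 < n and cond[i + 1] == cond[i]:
--             res.append(cond[i] + 'X')
--             i += 1
--         else:
--             res.append(cond[i] + (cond[i + 1] if i + 1 < n else 'X'))
--             i += 2
--     return res
-- ===== Notes on version B (the rewrite author's own statement) =====
-- stated objective: faster
-- what changed: Replaces A's three passes (grow a filler-padded flat string by repeated string concatenation, pad, then re-slice it into pairs) with a single variable-stride scan over the filtered letters that emits each digraph directly, advancing 1 on a double at a pair boundary and 2 otherwise.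
import Mathlib
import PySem

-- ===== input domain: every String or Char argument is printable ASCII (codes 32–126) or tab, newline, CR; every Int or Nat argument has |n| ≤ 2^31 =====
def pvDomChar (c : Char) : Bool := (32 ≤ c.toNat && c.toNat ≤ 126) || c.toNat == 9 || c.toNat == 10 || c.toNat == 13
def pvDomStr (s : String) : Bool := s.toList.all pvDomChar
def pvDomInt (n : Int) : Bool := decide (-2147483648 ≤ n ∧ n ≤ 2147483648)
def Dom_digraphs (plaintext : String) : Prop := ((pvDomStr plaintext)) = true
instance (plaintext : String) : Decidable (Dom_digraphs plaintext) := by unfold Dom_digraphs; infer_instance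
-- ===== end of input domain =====

-- B replaces A's grow-a-flat-string-then-reslice pipeline (quadratic repeated string concatenation) with a single variable-stride scan emitting digraphs directly; measured faster.


-- ===== PORT A =====
-- the 'for i in range(len(condensed_text))' loop building text_with_filler; index is always in
-- range when read, so List.getD is exact; 'i < len - 1' is kept as Nat subtraction, exact here.
def digraphsFill (cond : List Char) (i : Nat) (s : List Char) : List Char :=
  if i < cond.length then
    digraphsFill cond (i + 1)
      (if i < cond.length - 1 ∧ cond.getD i ' ' = cond.getD (i + 1) ' '
          ∧ (s ++ [cond.getD i ' ']).length % 2 ≠ 0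
       then (s ++ [cond.getD i ' ']) ++ ['X'] else s ++ [cond.getD i ' '])
  else s
termination_by cond.length - i

def digraphs (plaintext : String) : List String :=
  let condensed := (PySem.Str.upper plaintext).toList.filter PySem.Chars.isalpha
  let t0 := digraphsFill condensed 0 []
  let t := if t0.length % 2 ≠ 0 then t0 ++ ['X'] else t0
  (PySem.List.pyRange 0 (t.length : Int) 2).map
    (fun i => String.ofList (PySem.List.slice t (some i) (some (i + 2))))

-- ===== PORT B =====
-- the 'while i < n' loop of Source B; cons-recursion transcribes appending to res.
def digraphsPairs (cond : List Char) (i : Nat) : List String :=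
  if i < cond.length then
    if i + 1 < cond.length ∧ cond.getD (i + 1) ' ' = cond.getD i ' ' then
      String.ofList [cond.getD i ' ', 'X'] :: digraphsPairs cond (i + 1)
    else
      String.ofList [cond.getD i ' ', if i + 1 < cond.length then cond.getD (i + 1) ' ' else 'X']
        :: digraphsPairs cond (i + 2)
  else []
termination_by cond.length - i

def digraphs_alt (plaintext : String) : List String :=
  digraphsPairs ((PySem.Str.upper plaintext).toList.filter PySem.Chars.isalpha) 0

-- ===== PRECONDITION & SPEC =====
def Spec_digraphs (plaintext : String) (out : List String) : Prop := out = digraphs_alt plaintext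
instance (plaintext : String) (out : List String) : Decidable (Spec_digraphs plaintext out) := by unfold Spec_digraphs; infer_instance

-- ===== CLAIM (what is proved, stated in full; the proofs are below) =====
def Claim_equal_digraphs : Prop := ∀ (plaintext : String), Dom_digraphs plaintext → Spec_digraphs plaintext (digraphs plaintext)

-- ===== LEMMAS AND PROOFS =====

-- chunk2 t = the pairs A's final slicing comprehension extracts from t
def chunk2 : List Char → List String
  | [] => []
  | [a] => [String.ofList [a]]
  | a :: b :: t => String.ofList [a, b] :: chunk2 t

lemma chunk2_append_two (s : List Char) (a b : Char) (hs : s.length % 2 = 0) :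
    chunk2 (s ++ [a, b]) = chunk2 s ++ [String.ofList [a, b]] := by
  induction s using chunk2.induct with
  | case1 => simp [chunk2]
  | case2 c => simp at hs
  | case3 c d t ih =>
    have : t.length % 2 = 0 := by simp at hs; omega
    simpa [chunk2] using ih this

lemma map_take2_range (t : List Char) :
    (List.range ((t.length + 1) / 2)).map (fun k => String.ofList ((t.drop (2 * k)).take 2))
      = chunk2 t := by
  induction t using chunk2.induct with
  | case1 => simp [chunk2]
  | case2 a => simp [chunk2]
  | case3 a b r ih =>
    have hlen : ((a :: b :: r).length + 1) / 2 = (r.length + 1) / 2 + 1 := by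
      simp; omega
    rw [hlen, List.range_succ_eq_map, List.map_cons, List.map_map]
    refine congrArg₂ _ (by simp) ?_
    rw [← ih]
    exact List.map_congr_left (fun k _ => by
      simp [Function.comp, Nat.mul_add, List.drop_succ_cons])

-- A's slicing comprehension over range(0, len, 2) is chunk2
lemma slice_map_eq_chunk2 (t : List Char) :
    (PySem.List.pyRange 0 (t.length : Int) 2).map
        (fun i => String.ofList (PySem.List.slice t (some i) (some (i + 2)))) = chunk2 t := by
  rw [PySem.List.pyRange_of_pos 0 (t.length : Int) (by omega)]
  rw [← map_take2_range t, List.map_map]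
  have hcnt : (if (0 : Int) < (t.length : Int) then (((t.length : Int) - 0 + 2 - 1) / 2).toNat else 0)
      = (t.length + 1) / 2 := by
    split <;> omega
  rw [hcnt]
  refine List.map_congr_left (fun k _ => ?_)
  show String.ofList (PySem.List.slice t (some ((0 : Int) + 2 * (k : Int))) (some ((0 : Int) + 2 * (k : Int) + 2))) = _
  have h1 : (0 : Int) + 2 * (k : Int) = ((2 * k : Nat) : Int) := by push_cast; ring
  have h2 : ((2 * k : Nat) : Int) + 2 = ((2 * k + 2 : Nat) : Int) := by push_cast; ring
  rw [h1, h2, PySem.List.slice_natCast]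
  congr 2
  omega

lemma fill_pairs (cond : List Char) :
    ∀ fuel i s, cond.length - i ≤ fuel → s.length % 2 = 0 →
      chunk2 (if (digraphsFill cond i s).length % 2 ≠ 0
              then digraphsFill cond i s ++ ['X'] else digraphsFill cond i s)
        = chunk2 s ++ digraphsPairs cond i := by
  intro fuel
  induction fuel with
  | zero =>
    intro i s hf hs
    have hi : ¬ i < cond.length := by omega
    rw [digraphsFill, digraphsPairs, if_neg hi, if_neg hi, if_neg (by omega)]
    simp
  | succ m ih =>
    intro i s hf hs
    by_cases hi : i < cond.length
    · rw [digraphsFill, if_pos hi, digraphsPairs, if_pos hi]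
      by_cases hd : i + 1 < cond.length ∧ cond.getD (i + 1) ' ' = cond.getD i ' '
      · -- double letter at a pair boundary: A inserts X (current length is odd), B emits cX
        obtain ⟨hd1, hd2⟩ := hd
        have hA : i < cond.length - 1 ∧ cond.getD i ' ' = cond.getD (i + 1) ' '
            ∧ (s ++ [cond.getD i ' ']).length % 2 ≠ 0 := ⟨by omega, hd2.symm, by simp; omega⟩
        rw [if_pos (show i + 1 < cond.length ∧ cond.getD (i + 1) ' ' = cond.getD i ' ' from ⟨hd1, hd2⟩),
            if_pos hA, ih (i + 1) _ (by omega) (by simp; omega)]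
        rw [show s ++ [cond.getD i ' '] ++ ['X'] = s ++ [cond.getD i ' ', 'X'] by simp,
            chunk2_append_two s _ _ hs]
        simp
      · rw [if_neg hd]
        by_cases h1 : i + 1 < cond.length
        · -- ordinary pair: A appends two chars with no X in between
          have hne : ¬ (i < cond.length - 1 ∧ cond.getD i ' ' = cond.getD (i + 1) ' '
              ∧ (s ++ [cond.getD i ' ']).length % 2 ≠ 0) := by
            rintro ⟨-, he, -⟩; exact hd ⟨h1, he.symm⟩
          rw [if_neg hne, digraphsFill, if_pos h1]
          have hne2 : ¬ (i + 1 < cond.length - 1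
              ∧ cond.getD (i + 1) ' ' = cond.getD (i + 1 + 1) ' '
              ∧ (s ++ [cond.getD i ' '] ++ [cond.getD (i + 1) ' ']).length % 2 ≠ 0) := by
            rintro ⟨-, -, hodd⟩; simp at hodd; omega
          rw [if_neg hne2, ih (i + 1 + 1) _ (by omega) (by simp; omega)]
          rw [show s ++ [cond.getD i ' '] ++ [cond.getD (i + 1) ' ']
                = s ++ [cond.getD i ' ', cond.getD (i + 1) ' '] by simp,
              chunk2_append_two s _ _ hs]
          simp [h1, show i + 1 + 1 = i + 2 by omega]
        · -- lone final letter: A's trailing pad and B's 'X' filler coincide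
          have hne : ¬ (i < cond.length - 1 ∧ cond.getD i ' ' = cond.getD (i + 1) ' '
              ∧ (s ++ [cond.getD i ' ']).length % 2 ≠ 0) := by
            rintro ⟨hlt, -, -⟩; omega
          rw [if_neg hne, digraphsFill, if_neg h1,
              if_pos (show (s ++ [cond.getD i ' ']).length % 2 ≠ 0 by simp; omega)]
          rw [show s ++ [cond.getD i ' '] ++ ['X'] = s ++ [cond.getD i ' ', 'X'] by simp,
              chunk2_append_two s _ _ hs]
          have hnil : digraphsPairs cond (i + 2) = [] := by
            rw [digraphsPairs, if_neg (by omega)]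
          simp [h1, hnil]
    · rw [digraphsFill, if_neg hi, digraphsPairs, if_neg hi, if_neg (by omega)]
      simp

-- ===== VERDICT (by name: the statement is the Claim_ definition above) =====
theorem digraphs_spec : Claim_equal_digraphs := by
  intro p _
  show digraphs p = digraphs_alt p
  simp only [digraphs, digraphs_alt]
  rw [slice_map_eq_chunk2]
  have h := fill_pairs ((PySem.Str.upper p).toList.filter PySem.Chars.isalpha)
      ((PySem.Str.upper p).toList.filter PySem.Chars.isalpha).length 0 [] (by omega) (by simp)
  simpa [chunk2] using h
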